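-- pv_equiv track=rewrite | github.com/rhystmills/craters | parseCraterSvg.py | find_min_values
-- ===== SOURCE A (Python) =====
-- def find_min_values(data):
--     min_values = {
--         'x':0,
--         'y':0,
--         'r':0
--     }
--     for row in data:
--         if row['x'] < min_values['x']:
--             min_values['x'] = row['x']
--         if row['y'] < min_values['y']:
--             min_values['y'] = row['y']
--         if row['r'] < min_values['r']:
--             min_values['r'] = row['r']
--     return min_values
-- ===== SOURCE B (Python) =====
-- def find_min_values(data):
--     return {k: min([0] + [row[k] for row in data]) for k in ('x', 'y', 'r')}
-- ===== Notes on version B (the rewrite author's own statement) =====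
-- stated objective: idiomatic
-- what changed: Replaces the single fused loop maintaining three compare-and-assign accumulators with a dict comprehension that computes each key's minimum independently via min([0] + values), i.e. three separate min-reductions instead of one manual pass.
import Mathlib
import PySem

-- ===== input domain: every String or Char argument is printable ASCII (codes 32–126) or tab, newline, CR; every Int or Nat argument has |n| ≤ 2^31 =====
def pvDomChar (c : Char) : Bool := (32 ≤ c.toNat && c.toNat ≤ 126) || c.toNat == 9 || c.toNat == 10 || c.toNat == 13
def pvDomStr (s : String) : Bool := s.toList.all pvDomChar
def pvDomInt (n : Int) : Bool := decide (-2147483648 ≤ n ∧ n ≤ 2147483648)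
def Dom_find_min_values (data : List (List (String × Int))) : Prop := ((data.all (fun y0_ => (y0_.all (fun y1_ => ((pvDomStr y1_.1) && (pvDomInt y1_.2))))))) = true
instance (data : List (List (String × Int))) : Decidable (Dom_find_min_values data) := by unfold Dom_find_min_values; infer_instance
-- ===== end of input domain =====

-- Header: B computes each of the three minima as an independent min-reduction (one per key)
-- instead of A's single fused loop with three compare-and-assign accumulators; same O(n) cost.

-- shared key lookup: row[k] as first match in the association list, 0 only outside Pre_ (where A raises KeyError)
def pvRowGet (row : List (String × Int)) (k : String) : Int :=
  ((row.find? (fun p => p.1 == k)).map Prod.snd).getD 0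

-- ===== PORT A =====
def find_min_values (data : List (List (String × Int))) : List (String × Int) :=
  let st := data.foldl (fun (m : Int × Int × Int) row =>
    let mx := if pvRowGet row "x" < m.1 then pvRowGet row "x" else m.1
    let my := if pvRowGet row "y" < m.2.1 then pvRowGet row "y" else m.2.1
    let mr := if pvRowGet row "r" < m.2.2 then pvRowGet row "r" else m.2.2
    (mx, my, mr)) (0, 0, 0)
  [("x", st.1), ("y", st.2.1), ("r", st.2.2)]

-- ===== PORT B =====
def find_min_values_alt (data : List (List (String × Int))) : List (String × Int) :=
  ["x", "y", "r"].map (fun k =>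
    (k, (data.map (fun row => pvRowGet row k)).foldl min 0))

-- ===== PRECONDITION & SPEC =====
-- Pre_: every row contains the keys "x", "y" and "r"; on a row missing one, A raises KeyError.
def Pre_find_min_values (data : List (List (String × Int))) : Prop :=
  (data.all (fun row => row.any (fun p => p.1 == "x") && row.any (fun p => p.1 == "y") && row.any (fun p => p.1 == "r"))) = true
instance (data : List (List (String × Int))) : Decidable (Pre_find_min_values data) := by unfold Pre_find_min_values; infer_instance
def pvWitness_find_min_values : (List (List (String × Int))) := [[("x", 5), ("y", -2), ("r", 3)], [("x", -1), ("y", 0), ("r", -7)]]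

def Spec_find_min_values (data : List (List (String × Int))) (out : List (String × Int)) : Prop := out = find_min_values_alt data
instance (data : List (List (String × Int))) (out : List (String × Int)) : Decidable (Spec_find_min_values data out) := by unfold Spec_find_min_values; infer_instance

-- ===== CLAIM (what is proved, stated in full; the proofs are below) =====
def Claim_equal_find_min_values : Prop := ∀ (data : List (List (String × Int))), Dom_find_min_values data → Pre_find_min_values data → Spec_find_min_values data (find_min_values data)

-- ===== LEMMAS AND PROOFS =====

-- ===== VERDICT (by name: the statement is the Claim_ definition above) =====
-- A's fold of the triple of accumulators equals the three componentwise min-folds.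
theorem pv_fold_triple (data : List (List (String × Int))) (a b c : Int) :
    data.foldl (fun (m : Int × Int × Int) row =>
      let mx := if pvRowGet row "x" < m.1 then pvRowGet row "x" else m.1
      let my := if pvRowGet row "y" < m.2.1 then pvRowGet row "y" else m.2.1
      let mr := if pvRowGet row "r" < m.2.2 then pvRowGet row "r" else m.2.2
      (mx, my, mr)) (a, b, c)
    = ((data.map (fun row => pvRowGet row "x")).foldl min a,
       (data.map (fun row => pvRowGet row "y")).foldl min b,
       (data.map (fun row => pvRowGet row "r")).foldl min c) := by
  induction data generalizing a b c with
  | nil => rfl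
  | cons row rest ih =>
      have hmin : ∀ (v w : Int), (if v < w then v else w) = min w v := by
        intro v w; simp [min_def]; omega
      simp only [List.foldl_cons, List.map_cons]
      rw [ih]
      simp only [hmin]

theorem find_min_values_spec : Claim_equal_find_min_values := by
  intro data _ _
  unfold Spec_find_min_values find_min_values find_min_values_alt
  rw [pv_fold_triple]
  rfl
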